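-- pv_equiv track=rewrite | github.com/ZPGuiGroupWhu/OGC-WMS-Discovery-Portal | server/querywmslist_server_flask/MDL_RM/src/main/util/RetrievalUtil.py | retrieve_docs_based_on_terms_covered_samples
-- ===== SOURCE A (Python) =====
-- def retrieve_docs_based_on_terms_covered_samples(sub_intention, terms_covered_samples, sample_category):
--     result = set()
--     first_term = True
--     for tmp_dim in sub_intention:
--         tmp_value = sub_intention[tmp_dim]
--         tmp_value_covered_specific_samples = None
--         tmp_value_covered_samples = terms_covered_samples[tmp_dim][tmp_value]
--         if sample_category == "positive":
--             tmp_value_covered_specific_samples = tmp_value_covered_samples["relevance"]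
--         elif sample_category == "negative":
--             tmp_value_covered_specific_samples = tmp_value_covered_samples["irrelevance"]
--         if first_term:  # 某个概念可能本来覆盖的负样本就是0，因此不能通过result是否为空来判断
--             result = result.union(tmp_value_covered_specific_samples)
--             first_term = False
--         else:
--             result = result.intersection(tmp_value_covered_specific_samples)
--     return result
-- ===== SOURCE B (Python) =====
-- def retrieve_docs_based_on_terms_covered_samples(sub_intention, terms_covered_samples, sample_category):
--     # One pass: count, per document, in how many terms' selected sample sets it
--     # occurs; the intersection is exactly the documents counted in every term.
--     counts = {}
--     num_terms = 0
--     for tmp_dim, tmp_value in sub_intention.items():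
--         tmp_value_covered_samples = terms_covered_samples[tmp_dim][tmp_value]
--         if sample_category == "positive":
--             selected = tmp_value_covered_samples["relevance"]
--         elif sample_category == "negative":
--             selected = tmp_value_covered_samples["irrelevance"]
--         else:
--             selected = None
--         for doc in set(selected):
--             counts[doc] = counts.get(doc, 0) + 1
--         num_terms += 1
--     return {doc for doc, c in counts.items() if c == num_terms}
-- ===== Notes on version B (the rewrite author's own statement) =====
-- stated objective: alternative
-- what changed: B replaces A's incremental union/then-intersection fold (with a first_term flag) by a single frequency count: it tallies in how many terms' selected sample sets each document occurs and returns the documents counted in every term.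
import Mathlib
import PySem

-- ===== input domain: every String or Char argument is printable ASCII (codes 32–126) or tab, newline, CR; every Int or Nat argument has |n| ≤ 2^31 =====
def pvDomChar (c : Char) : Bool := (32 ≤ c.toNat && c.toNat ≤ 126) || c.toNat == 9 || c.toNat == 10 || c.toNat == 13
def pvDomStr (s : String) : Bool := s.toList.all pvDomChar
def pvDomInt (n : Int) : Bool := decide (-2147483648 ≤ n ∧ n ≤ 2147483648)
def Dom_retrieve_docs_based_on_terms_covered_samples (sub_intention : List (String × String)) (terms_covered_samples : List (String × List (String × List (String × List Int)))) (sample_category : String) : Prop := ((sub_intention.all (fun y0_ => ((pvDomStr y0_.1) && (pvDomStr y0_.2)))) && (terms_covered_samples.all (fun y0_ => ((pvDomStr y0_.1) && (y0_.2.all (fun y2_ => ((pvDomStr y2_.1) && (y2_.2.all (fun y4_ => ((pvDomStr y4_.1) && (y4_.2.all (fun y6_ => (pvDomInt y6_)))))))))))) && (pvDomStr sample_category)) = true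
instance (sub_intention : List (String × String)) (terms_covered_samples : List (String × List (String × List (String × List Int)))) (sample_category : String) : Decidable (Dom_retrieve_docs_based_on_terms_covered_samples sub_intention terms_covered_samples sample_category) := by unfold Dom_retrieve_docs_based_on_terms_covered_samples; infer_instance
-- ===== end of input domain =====

-- B replaces A's incremental union/intersection fold by a single frequency count:
-- it tallies, per document, in how many terms' selected sample sets it occurs and
-- keeps the documents counted in every term (objective: alternative, same cost).

-- ===== PORT A =====
-- shared lookup helper: both Pythons contain the identical lookup/branch lines
-- 'terms_covered_samples[tmp_dim][tmp_value]' + category branch; under the assoc-list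
-- convention a dict lookup is a first-match lookup (PySem.Dict.get?); the [] defaults
-- are only reached outside Pre_, where the Python raises (KeyError / TypeError).
def pvSelect (terms_covered_samples : List (String × List (String × List (String × List Int)))) (sample_category : String) (tmp_dim tmp_value : String) : List Int :=
  let d1 := (PySem.Dict.mk terms_covered_samples).getD tmp_dim []
  let tmp_value_covered_samples := (PySem.Dict.mk d1).getD tmp_value []
  if sample_category = "positive" then (PySem.Dict.mk tmp_value_covered_samples).getD "relevance" []
  else if sample_category = "negative" then (PySem.Dict.mk tmp_value_covered_samples).getD "irrelevance" []
  else []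

-- A: iterating the dict 'for tmp_dim in sub_intention' with 'sub_intention[tmp_dim]'
-- visits exactly the (key, value) pairs of the assoc list in order.
def retrieve_docs_based_on_terms_covered_samples (sub_intention : List (String × String)) (terms_covered_samples : List (String × List (String × List (String × List Int)))) (sample_category : String) : List Int :=
  (sub_intention.foldl (fun (st : PySem.Set Int × Bool) kv =>
      let sel := pvSelect terms_covered_samples sample_category kv.1 kv.2
      if st.2 then (PySem.Set.union st.1 sel, false)
      else (PySem.Set.inter st.1 sel, false))
    (PySem.Set.empty, true)).1

-- ===== PORT B =====
def retrieve_docs_based_on_terms_covered_samples_alt (sub_intention : List (String × String)) (terms_covered_samples : List (String × List (String × List (String × List Int)))) (sample_category : String) : List Int :=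
  let st := sub_intention.foldl (fun (st : PySem.Dict Int Int × Int) kv =>
      let sel := pvSelect terms_covered_samples sample_category kv.1 kv.2
      ((PySem.Set.ofList sel).foldl (fun c doc => c.modify doc 0 (· + 1)) st.1, st.2 + 1))
    (PySem.Dict.empty, 0)
  (st.1.items.filter (fun p => p.2 == st.2)).map (fun p => p.1)

-- ===== PRECONDITION & SPEC =====
def pvSelOk (terms_covered_samples : List (String × List (String × List (String × List Int)))) (sample_category : String) (kv : String × String) : Bool :=
  ((((PySem.Dict.mk terms_covered_samples).get? kv.1).bind
      (fun d1 => (PySem.Dict.mk d1).get? kv.2)).bind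
    (fun d2 => (PySem.Dict.mk d2).get?
      (if sample_category = "positive" then "relevance" else "irrelevance"))).isSome

-- Pre_ excludes exactly the inputs on which the Python A raises: a nonempty
-- sub_intention with a sample_category other than "positive"/"negative" (TypeError on
-- set().union(None)) or with a failing dict lookup (KeyError). A returns on all other inputs.
def Pre_retrieve_docs_based_on_terms_covered_samples (sub_intention : List (String × String)) (terms_covered_samples : List (String × List (String × List (String × List Int)))) (sample_category : String) : Prop :=
  sub_intention = [] ∨
    ((sample_category = "positive" ∨ sample_category = "negative") ∧
      ∀ kv ∈ sub_intention, pvSelOk terms_covered_samples sample_category kv = true)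
instance (sub_intention : List (String × String)) (terms_covered_samples : List (String × List (String × List (String × List Int)))) (sample_category : String) : Decidable (Pre_retrieve_docs_based_on_terms_covered_samples sub_intention terms_covered_samples sample_category) := by unfold Pre_retrieve_docs_based_on_terms_covered_samples; infer_instance

def pvWitness_retrieve_docs_based_on_terms_covered_samples : (List (String × String)) × (List (String × List (String × List (String × List Int)))) × String :=
  ([("a", "b")], [("a", [("b", [("relevance", [1, 2]), ("irrelevance", [])])])], "positive")

def Spec_retrieve_docs_based_on_terms_covered_samples (sub_intention : List (String × String)) (terms_covered_samples : List (String × List (String × List (String × List Int)))) (sample_category : String) (out : List Int) : Prop := out = retrieve_docs_based_on_terms_covered_samples_alt sub_intention terms_covered_samples sample_category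
instance (sub_intention : List (String × String)) (terms_covered_samples : List (String × List (String × List (String × List Int)))) (sample_category : String) (out : List Int) : Decidable (Spec_retrieve_docs_based_on_terms_covered_samples sub_intention terms_covered_samples sample_category out) := by unfold Spec_retrieve_docs_based_on_terms_covered_samples; infer_instance

-- ===== CLAIM (what is proved, stated in full; the proofs are below) =====
def Claim_equal_retrieve_docs_based_on_terms_covered_samples : Prop := ∀ (sub_intention : List (String × String)) (terms_covered_samples : List (String × List (String × List (String × List Int)))) (sample_category : String), Dom_retrieve_docs_based_on_terms_covered_samples sub_intention terms_covered_samples sample_category → Pre_retrieve_docs_based_on_terms_covered_samples sub_intention terms_covered_samples sample_category → Spec_retrieve_docs_based_on_terms_covered_samples sub_intention terms_covered_samples sample_category (retrieve_docs_based_on_terms_covered_samples sub_intention terms_covered_samples sample_category)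

-- ===== LEMMAS AND PROOFS =====

-- B's fold: the counter ignores the term counter, the term counter ends at the length
lemma pvB_fold (L : List (List Int)) (c0 : PySem.Dict Int Int) (n0 : Int) :
    L.foldl (fun (st : PySem.Dict Int Int × Int) sel =>
        ((PySem.Set.ofList sel).foldl (fun c doc => c.modify doc 0 (· + 1)) st.1, st.2 + 1)) (c0, n0)
      = (L.foldl (fun c sel => (PySem.Set.ofList sel).foldl (fun c doc => c.modify doc 0 (· + 1)) c) c0,
         n0 + L.length) := by
  induction L generalizing c0 n0 with
  | nil => simp
  | cons s rest ih => simp [List.foldl_cons, ih]; omega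

-- folding the counter over each set in turn is the counter of the flattened list
lemma pvB_counter (L : List (List Int)) (c0 : PySem.Dict Int Int) :
    L.foldl (fun c sel => (PySem.Set.ofList sel).foldl (fun c doc => c.modify doc 0 (· + 1)) c) c0
      = (L.flatMap PySem.Set.ofList).foldl (fun d x => d.modify x 0 (· + 1)) c0 := by
  induction L generalizing c0 with
  | nil => rfl
  | cons s rest ih => simp [List.foldl_cons, List.flatMap_cons, List.foldl_append, ih]

lemma pvFiltMap {A : Type} (l : List A) (g : A → Int) (q : Int → Bool) :
    ((l.map (fun k => (k, g k))).filter (fun p => q p.2)).map (fun p => p.1)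
      = l.filter (fun k => q (g k)) := by
  induction l with
  | nil => rfl
  | cons x xs ih => by_cases h : q (g x) <;> simp [h, ih]

-- count of a document in the flattened dedup'd sets = number of sets containing it
lemma pvCount (L : List (List Int)) (x : Int) :
    (L.flatMap PySem.Set.ofList).count x = L.countP (fun sel => decide (x ∈ sel)) := by
  induction L with
  | nil => rfl
  | cons s rest ih =>
      simp only [List.flatMap_cons, List.count_append, List.countP_cons, ih]
      by_cases h : x ∈ s
      · rw [List.count_eq_one_of_mem (PySem.Set.nodup_ofList _) ((PySem.Set.mem_ofList s x).2 h)]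
        simp [h]; omega
      · rw [List.count_eq_zero.2 (fun hc => h ((PySem.Set.mem_ofList s x).1 hc))]
        simp [h]

-- A's intersection fold is a filter by membership in every remaining set
lemma pvA_fold (rest : List (List Int)) (a : PySem.Set Int) :
    (rest.foldl (fun (st : PySem.Set Int × Bool) sel =>
        if st.2 then (PySem.Set.union st.1 sel, false)
        else (PySem.Set.inter st.1 sel, false)) (a, false)).1
      = a.filter (fun x => rest.all (fun t => t.contains x)) := by
  induction rest generalizing a with
  | nil => simp
  | cons t rest ih =>
      simp only [List.foldl_cons, Bool.false_eq_true, if_false, ih]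
      show List.filter _ (List.filter (fun x => PySem.Set.contains t x) a) = _
      rw [List.filter_filter]
      apply List.filter_congr; intro x hx
      simp [List.all_cons, Bool.and_comm]

-- the main equality, over the list of selected sample lists
lemma pvMain (L : List (List Int)) :
    (L.foldl (fun (st : PySem.Set Int × Bool) sel =>
        if st.2 then (PySem.Set.union st.1 sel, false)
        else (PySem.Set.inter st.1 sel, false)) (PySem.Set.empty, true)).1
      = ((((L.foldl (fun (st : PySem.Dict Int Int × Int) sel =>
            ((PySem.Set.ofList sel).foldl (fun c doc => c.modify doc 0 (· + 1)) st.1, st.2 + 1))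
          (PySem.Dict.empty, 0)).1).items.filter
            (fun p => p.2 == ((L.foldl (fun (st : PySem.Dict Int Int × Int) sel =>
            ((PySem.Set.ofList sel).foldl (fun c doc => c.modify doc 0 (· + 1)) st.1, st.2 + 1))
          (PySem.Dict.empty, 0)).2))).map (fun p => p.1)) := by
  rw [pvB_fold, pvB_counter]
  simp only [zero_add]
  cases L with
  | nil => rfl
  | cons s rest =>
      rw [show ((s :: rest).flatMap PySem.Set.ofList)
            = PySem.Set.ofList s ++ rest.flatMap PySem.Set.ofList from by
          simp [List.flatMap_cons]]
      rw [show (List.foldl (fun d x => d.modify x 0 (· + 1)) PySem.Dict.empty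
              (PySem.Set.ofList s ++ rest.flatMap PySem.Set.ofList) : PySem.Dict Int Int)
            = PySem.Dict.counter (PySem.Set.ofList s ++ rest.flatMap PySem.Set.ofList) from rfl]
      rw [PySem.Dict.items_counter]
      rw [pvFiltMap (PySem.Set.ofList (PySem.Set.ofList s ++ rest.flatMap PySem.Set.ofList))
            (fun k => ((PySem.Set.ofList s ++ rest.flatMap PySem.Set.ofList).count k : Int))
            (fun v => v == (((s :: rest).length : Nat) : Int))]
      simp only [List.foldl_cons, if_true]
      rw [pvA_fold]
      have hofs : (PySem.Set.empty : PySem.Set Int).union s = PySem.Set.ofList s := rfl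
      rw [hofs]
      rw [show PySem.Set.ofList (PySem.Set.ofList s ++ rest.flatMap PySem.Set.ofList)
            = PySem.Set.ofList s ++ (PySem.Set.ofList (rest.flatMap PySem.Set.ofList)).filter
                (fun y => !(PySem.Set.ofList s).contains y) from by
          rw [PySem.Set.ofList_append, PySem.Set.ofList_ofList, PySem.Set.update_eq_append_filter]]
      rw [List.filter_append]
      have hextra : ((PySem.Set.ofList (rest.flatMap PySem.Set.ofList)).filter
            (fun y => !(PySem.Set.ofList s).contains y)).filter
            (fun k => ((PySem.Set.ofList s ++ rest.flatMap PySem.Set.ofList).count k : Int)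
              == (((s :: rest).length : Nat) : Int)) = [] := by
        rw [List.filter_eq_nil_iff]
        intro k hk
        have hns : k ∉ s := by
          have := (List.mem_filter.1 hk).2
          intro hmem
          simp [PySem.Set.mem_ofList, hmem] at this
        have hc0 : (PySem.Set.ofList s).count k = 0 :=
          List.count_eq_zero.2 (fun hc => hns ((PySem.Set.mem_ofList s k).1 hc))
        have hle : (rest.flatMap PySem.Set.ofList).count k ≤ rest.length := by
          rw [pvCount]; exact List.countP_le_length
        simp only [List.count_append, hc0, Nat.zero_add, List.length_cons, beq_iff_eq,
          Nat.cast_inj]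
        omega
      rw [hextra, List.append_nil]
      apply List.filter_congr
      intro x hx
      have hxs : x ∈ s := (PySem.Set.mem_ofList s x).1 hx
      have hc1 : (PySem.Set.ofList s).count x = 1 :=
        List.count_eq_one_of_mem (PySem.Set.nodup_ofList _) hx
      rw [Bool.eq_iff_iff]
      simp only [List.all_eq_true, beq_iff_eq, List.count_append, hc1, pvCount,
        List.length_cons, Nat.cast_inj]
      constructor
      · intro h
        have hall : ∀ t ∈ rest, (fun sel => decide (x ∈ sel)) t = true := fun t ht => by
          simpa using h t ht
        rw [List.countP_eq_length.2 hall]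
        omega
      · intro h t ht
        have hc : rest.countP (fun sel => decide (x ∈ sel)) = rest.length := by omega
        simpa using List.countP_eq_length.1 hc t ht

-- ===== VERDICT (by name: the statement is the Claim_ definition above) =====
theorem retrieve_docs_based_on_terms_covered_samples_spec : Claim_equal_retrieve_docs_based_on_terms_covered_samples := by
  intro si tcs cat _ _
  unfold Spec_retrieve_docs_based_on_terms_covered_samples
  unfold retrieve_docs_based_on_terms_covered_samples retrieve_docs_based_on_terms_covered_samples_alt
  have h := pvMain (si.map (fun kv : String × String => pvSelect tcs cat kv.1 kv.2))
  rw [List.foldl_map, List.foldl_map] at h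
  exact h
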